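-- pv_equiv track=rewrite | github.com/hgwood/codingame | ragnarok/ragnarok.py | free_neighboring_positions
-- ===== SOURCE A (Python) =====
-- def is_safe(x, y, giant_positions):
--     if (x, y) in giant_positions: return False
--     neighbors = (
--         (x - 1, y - 1),
--         (x - 1, y),
--         (x - 1, y + 1),
--         (x, y - 1),
--         (x, y + 1),
--         (x + 1, y - 1),
--         (x + 1, y),
--         (x + 1, y + 1))
--     return not any((nx,ny) in giant_positions for nx,ny in neighbors)
--
-- def free_neighboring_positions(x, y, giant_positions):
--     neighbors = (
--         ("NW", x - 1, y - 1),
--         ("W", x - 1, y),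
--         ("SW", x - 1, y + 1),
--         ("N", x, y - 1),
--         ("S", x, y + 1),
--         ("NE", x + 1, y - 1),
--         ("E", x + 1, y),
--         ("SE", x + 1, y + 1))
--     return [(dir,nx,ny) for dir,nx,ny in neighbors if is_safe(nx,ny,giant_positions)]
-- ===== SOURCE B (Python) =====
-- def free_neighboring_positions(x, y, giant_positions):
--     forbidden = set()
--     for gx, gy in giant_positions:
--         for dx in (-1, 0, 1):
--             for dy in (-1, 0, 1):
--                 forbidden.add((gx + dx, gy + dy))
--     neighbors = (
--         ("NW", x - 1, y - 1),
--         ("W", x - 1, y),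
--         ("SW", x - 1, y + 1),
--         ("N", x, y - 1),
--         ("S", x, y + 1),
--         ("NE", x + 1, y - 1),
--         ("E", x + 1, y),
--         ("SE", x + 1, y + 1))
--     return [(dir, nx, ny) for dir, nx, ny in neighbors if (nx, ny) not in forbidden]
-- ===== Notes on version B (the rewrite author's own statement) =====
-- stated objective: alternative
-- what changed: Replaces the per-candidate is_safe scan over each candidate's 9-cell neighborhood with a giant-centric dilation: one pass builds a forbidden set of all cells within Chebyshev distance 1 of any giant, then the 8 neighbors are filtered by a single set-membership test each.
import Mathlib
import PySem

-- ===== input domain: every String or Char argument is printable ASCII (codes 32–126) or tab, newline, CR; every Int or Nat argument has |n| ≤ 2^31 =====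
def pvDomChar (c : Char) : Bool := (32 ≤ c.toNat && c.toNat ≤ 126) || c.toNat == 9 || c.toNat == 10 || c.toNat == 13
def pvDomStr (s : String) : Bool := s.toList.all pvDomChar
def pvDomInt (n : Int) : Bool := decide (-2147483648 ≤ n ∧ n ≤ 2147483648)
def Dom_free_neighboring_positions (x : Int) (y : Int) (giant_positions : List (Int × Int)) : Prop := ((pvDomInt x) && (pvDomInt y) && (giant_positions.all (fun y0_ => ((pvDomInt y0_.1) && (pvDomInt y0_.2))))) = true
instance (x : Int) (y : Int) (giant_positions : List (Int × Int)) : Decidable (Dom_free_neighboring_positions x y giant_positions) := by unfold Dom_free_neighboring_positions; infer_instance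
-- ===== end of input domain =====

-- B builds a giant-centric 'forbidden' dilation set once instead of scanning each candidate's neighborhood (alternative decomposition, same cost).

-- ===== PORT A =====
def is_safe (x : Int) (y : Int) (giant_positions : List (Int × Int)) : Bool :=
  if (x, y) ∈ giant_positions then false
  else
    let neighbors : List (Int × Int) :=
      [(x - 1, y - 1), (x - 1, y), (x - 1, y + 1), (x, y - 1),
       (x, y + 1), (x + 1, y - 1), (x + 1, y), (x + 1, y + 1)]
    !(neighbors.any (fun p => decide (p ∈ giant_positions)))

def free_neighboring_positions (x : Int) (y : Int) (giant_positions : List (Int × Int)) : List (String × Int × Int) :=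
  let neighbors : List (String × Int × Int) :=
    [("NW", x - 1, y - 1), ("W", x - 1, y), ("SW", x - 1, y + 1), ("N", x, y - 1),
     ("S", x, y + 1), ("NE", x + 1, y - 1), ("E", x + 1, y), ("SE", x + 1, y + 1)]
  neighbors.filter (fun t => is_safe t.2.1 t.2.2 giant_positions)

-- ===== PORT B =====
def pvForbidden (giant_positions : List (Int × Int)) : PySem.Set (Int × Int) :=
  giant_positions.foldl (fun s g =>
    ([-1, 0, 1] : List Int).foldl (fun s dx =>
      ([-1, 0, 1] : List Int).foldl (fun s dy =>
        PySem.Set.add s (g.1 + dx, g.2 + dy)) s) s) PySem.Set.empty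

def free_neighboring_positions_alt (x : Int) (y : Int) (giant_positions : List (Int × Int)) : List (String × Int × Int) :=
  let forbidden := pvForbidden giant_positions
  let neighbors : List (String × Int × Int) :=
    [("NW", x - 1, y - 1), ("W", x - 1, y), ("SW", x - 1, y + 1), ("N", x, y - 1),
     ("S", x, y + 1), ("NE", x + 1, y - 1), ("E", x + 1, y), ("SE", x + 1, y + 1)]
  neighbors.filter (fun t => !(decide ((t.2.1, t.2.2) ∈ forbidden)))

-- ===== PRECONDITION & SPEC =====
def Spec_free_neighboring_positions (x : Int) (y : Int) (giant_positions : List (Int × Int)) (out : List (String × Int × Int)) : Prop := out = free_neighboring_positions_alt x y giant_positions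
instance (x : Int) (y : Int) (giant_positions : List (Int × Int)) (out : List (String × Int × Int)) : Decidable (Spec_free_neighboring_positions x y giant_positions out) := by unfold Spec_free_neighboring_positions; infer_instance

-- ===== CLAIM (what is proved, stated in full; the proofs are below) =====
def Claim_equal_free_neighboring_positions : Prop := ∀ (x : Int) (y : Int) (giant_positions : List (Int × Int)), Dom_free_neighboring_positions x y giant_positions → Spec_free_neighboring_positions x y giant_positions (free_neighboring_positions x y giant_positions)

-- ===== LEMMAS AND PROOFS =====

-- one step of B's outer loop: it adds exactly the cells Chebyshev-close to the giant g
lemma mem_forbidden_step (s : PySem.Set (Int × Int)) (g p : Int × Int) :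
    p ∈ (([-1, 0, 1] : List Int).foldl (fun s dx =>
          ([-1, 0, 1] : List Int).foldl (fun s dy =>
            PySem.Set.add s (g.1 + dx, g.2 + dy)) s) s) ↔
      p ∈ s ∨ (p.1 - g.1 ≤ 1 ∧ g.1 - p.1 ≤ 1 ∧ p.2 - g.2 ≤ 1 ∧ g.2 - p.2 ≤ 1) := by
  simp only [List.foldl, PySem.Set.mem_add, Prod.ext_iff]
  by_cases hs : p ∈ s
  · simp [hs]
  · simp only [hs, false_or]
    omega

lemma mem_forbidden_foldl (gp : List (Int × Int)) (s : PySem.Set (Int × Int)) (p : Int × Int) :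
    p ∈ gp.foldl (fun s g =>
          ([-1, 0, 1] : List Int).foldl (fun s dx =>
            ([-1, 0, 1] : List Int).foldl (fun s dy =>
              PySem.Set.add s (g.1 + dx, g.2 + dy)) s) s) s ↔
      p ∈ s ∨ ∃ g ∈ gp, p.1 - g.1 ≤ 1 ∧ g.1 - p.1 ≤ 1 ∧ p.2 - g.2 ≤ 1 ∧ g.2 - p.2 ≤ 1 := by
  induction gp generalizing s with
  | nil => simp
  | cons g gp ih =>
    rw [List.foldl_cons, ih, mem_forbidden_step]
    simp only [List.mem_cons]
    constructor
    · rintro ((h | h) | ⟨g', hg', h⟩)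
      · exact Or.inl h
      · exact Or.inr ⟨g, Or.inl rfl, h⟩
      · exact Or.inr ⟨g', Or.inr hg', h⟩
    · rintro (h | ⟨g', (rfl | hg'), h⟩)
      · exact Or.inl (Or.inl h)
      · exact Or.inl (Or.inr h)
      · exact Or.inr ⟨g', hg', h⟩

lemma mem_pvForbidden (gp : List (Int × Int)) (p : Int × Int) :
    p ∈ pvForbidden gp ↔ ∃ g ∈ gp, p.1 - g.1 ≤ 1 ∧ g.1 - p.1 ≤ 1 ∧ p.2 - g.2 ≤ 1 ∧ g.2 - p.2 ≤ 1 := by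
  rw [pvForbidden, mem_forbidden_foldl]
  simp [PySem.Set.empty]

lemma is_safe_iff (x y : Int) (gp : List (Int × Int)) :
    is_safe x y gp = true ↔ ¬ ∃ g ∈ gp, x - g.1 ≤ 1 ∧ g.1 - x ≤ 1 ∧ y - g.2 ≤ 1 ∧ g.2 - y ≤ 1 := by
  rw [is_safe]
  split_ifs with hmem
  · simp only [false_iff, not_not]
    refine ⟨(x, y), hmem, ?_⟩
    omega
  · simp only [Bool.not_eq_true', List.any_eq_false, decide_eq_true_eq]
    constructor
    · rintro h ⟨g, hg, hc⟩
      have hne : g.1 ≠ x ∨ g.2 ≠ y := by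
        by_contra hq
        push Not at hq
        have hgxy : g = (x, y) := Prod.ext hq.1 hq.2
        exact hmem (hgxy ▸ hg)
      have hmemlist : g ∈ ([(x - 1, y - 1), (x - 1, y), (x - 1, y + 1), (x, y - 1),
          (x, y + 1), (x + 1, y - 1), (x + 1, y), (x + 1, y + 1)] : List (Int × Int)) := by
        simp only [List.mem_cons, List.not_mem_nil, or_false, Prod.ext_iff]
        omega
      exact h g hmemlist hg
    · intro h p hp hpg
      apply h
      refine ⟨p, hpg, ?_⟩
      simp only [List.mem_cons, List.not_mem_nil, or_false, Prod.ext_iff] at hp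
      omega

lemma safe_eq_not_forbidden (x y : Int) (gp : List (Int × Int)) :
    is_safe x y gp = !(decide ((x, y) ∈ pvForbidden gp)) := by
  rw [Bool.eq_iff_iff, is_safe_iff]
  simp [mem_pvForbidden gp (x, y)]

-- ===== VERDICT (by name: the statement is the Claim_ definition above) =====
theorem free_neighboring_positions_spec : Claim_equal_free_neighboring_positions := by
  intro x y gp _
  unfold Spec_free_neighboring_positions free_neighboring_positions free_neighboring_positions_alt
  simp only [safe_eq_not_forbidden]
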